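-- pv_equiv track=rewrite | github.com/SANTHOSH2K4/KBOT | KBot/Bot/views.py | suggest_queries
-- ===== SOURCE A (Python) =====
-- def query_similarity(query1, query2):
--     words1 = set(query1.lower().split())
--     words2 = set(query2.lower().split())
--     overlap = len(words1.intersection(words2))
--     return overlap
--
-- def suggest_queries(user_query, predefined_queries):
--     suggested_queries = []
--     for query in predefined_queries:
--         relevance = query_similarity(user_query, query)
--         suggested_queries.append((query, relevance))
--
--     suggested_queries.sort(key=lambda x: x[1], reverse=True)
--
--     top_suggestions = [query for query, relevance in suggested_queries[:2]]
--
--     return top_suggestions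
-- ===== SOURCE B (Python) =====
-- def query_similarity(query1, query2):
--     words1 = set(query1.lower().split())
--     words2 = set(query2.lower().split())
--     overlap = len(words1.intersection(words2))
--     return overlap
--
-- def suggest_queries(user_query, predefined_queries):
--     best1 = None  # (query, relevance) with the highest relevance, earliest wins ties
--     best2 = None  # second highest
--     for query in predefined_queries:
--         relevance = query_similarity(user_query, query)
--         if best1 is None or relevance > best1[1]:
--             best2 = best1
--             best1 = (query, relevance)
--         elif best2 is None or relevance > best2[1]:
--             best2 = (query, relevance)
--     return [p[0] for p in (best1, best2) if p is not None]
-- ===== Notes on version B (the rewrite author's own statement) =====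
-- stated objective: alternative
-- what changed: Replaced build-pairs + stable sort + slice with a single pass that maintains the two best (query, relevance) candidates using strict comparisons to preserve A's stable tie-breaking.
import Mathlib
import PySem

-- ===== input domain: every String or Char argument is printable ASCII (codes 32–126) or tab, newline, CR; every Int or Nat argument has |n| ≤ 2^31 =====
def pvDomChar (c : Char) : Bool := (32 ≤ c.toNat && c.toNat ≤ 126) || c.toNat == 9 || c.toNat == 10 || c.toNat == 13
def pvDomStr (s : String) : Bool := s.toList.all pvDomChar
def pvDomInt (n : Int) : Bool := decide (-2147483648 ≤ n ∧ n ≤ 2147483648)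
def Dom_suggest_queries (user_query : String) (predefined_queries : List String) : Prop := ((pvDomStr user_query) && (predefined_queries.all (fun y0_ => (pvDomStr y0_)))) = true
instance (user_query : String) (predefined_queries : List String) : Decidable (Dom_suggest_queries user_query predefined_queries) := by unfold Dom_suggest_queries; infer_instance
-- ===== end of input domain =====

-- B replaces A's build-pairs + stable-sort + slice by a single pass keeping the two best candidates (same results; different algorithm).


-- ===== PORT A =====
-- helper shared by both Pythons (query_similarity is identical in Source A and Source B)
def query_similarity (query1 query2 : String) : Int :=
  let words1 := PySem.Set.ofList (PySem.Str.split₀ (PySem.Str.lower query1))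
  let words2 := PySem.Set.ofList (PySem.Str.split₀ (PySem.Str.lower query2))
  PySem.Set.len (PySem.Set.inter words1 words2)

def suggest_queries (user_query : String) (predefined_queries : List String) : List String :=
  let suggested_queries :=
    predefined_queries.foldl
      (fun acc query => acc ++ [(query, query_similarity user_query query)]) []
  let suggested_queries := PySem.List.sorted suggested_queries (fun x => x.2) true
  (PySem.List.slice suggested_queries none (some 2)).map (fun p => p.1)

-- ===== PORT B =====
def suggest_queries_alt (user_query : String) (predefined_queries : List String) : List String :=
  let st :=
    predefined_queries.foldl
      (fun (st : Option (String × Int) × Option (String × Int)) query =>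
        let relevance := query_similarity user_query query
        if (match st.1 with | none => true | some p => decide (p.2 < relevance)) then
          (some (query, relevance), st.1)
        else if (match st.2 with | none => true | some p => decide (p.2 < relevance)) then
          (st.1, some (query, relevance))
        else st)
      (none, none)
  [st.1, st.2].filterMap (fun o => o.map (fun p => p.1))

-- ===== PRECONDITION & SPEC =====
def Spec_suggest_queries (user_query : String) (predefined_queries : List String) (out : List String) : Prop := out = suggest_queries_alt user_query predefined_queries
instance (user_query : String) (predefined_queries : List String) (out : List String) : Decidable (Spec_suggest_queries user_query predefined_queries out) := by unfold Spec_suggest_queries; infer_instance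

-- ===== CLAIM (what is proved, stated in full; the proofs are below) =====
def Claim_equal_suggest_queries : Prop := ∀ (user_query : String) (predefined_queries : List String), Dom_suggest_queries user_query predefined_queries → Spec_suggest_queries user_query predefined_queries (suggest_queries user_query predefined_queries)

-- ===== LEMMAS AND PROOFS =====

-- first two elements of a list, as B's state
def pvTop2 : List (String × Int) → Option (String × Int) × Option (String × Int)
  | [] => (none, none)
  | [a] => (some a, none)
  | a :: b :: _ => (some a, some b)

-- B's loop body
def pvStep (uq : String) (st : Option (String × Int) × Option (String × Int)) (query : String) :
    Option (String × Int) × Option (String × Int) :=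
  let relevance := query_similarity uq query
  if (match st.1 with | none => true | some p => decide (p.2 < relevance)) then
    (some (query, relevance), st.1)
  else if (match st.2 with | none => true | some p => decide (p.2 < relevance)) then
    (st.1, some (query, relevance))
  else st

-- A's sort comparison for reverse=True on key (·.2)
def pvBf (a b : String × Int) : Bool := decide (b.2 < a.2)

-- one insertion step of A's stable sort changes the top-2 exactly as B's loop body does
theorem pvTop2_insertBy (s : List (String × Int)) (uq query : String) :
    pvTop2 (PySem.List.insertBy pvBf (query, query_similarity uq query) s)
      = pvStep uq (pvTop2 s) query := by
  match s with
  | [] => rfl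
  | [a] =>
    simp only [PySem.List.insertBy, pvStep, pvTop2, pvBf]
    split_ifs with h1 <;> simp_all
  | a :: b :: rest =>
    simp only [PySem.List.insertBy, pvStep, pvTop2, pvBf]
    split_ifs with h1 h2 <;> simp_all

theorem pvTop2_foldl (uq : String) (l : List String) (s : List (String × Int)) :
    pvTop2 (l.foldl (fun acc q => PySem.List.insertBy pvBf (q, query_similarity uq q) acc) s)
      = l.foldl (pvStep uq) (pvTop2 s) := by
  induction l generalizing s with
  | nil => rfl
  | cons q l ih => simp only [List.foldl_cons, ih, pvTop2_insertBy]

-- A's final slice+map, expressed through the top-2 state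
theorem pvFinal (s : List (String × Int)) :
    (PySem.List.slice s none (some 2)).map (fun p => p.1)
      = [(pvTop2 s).1, (pvTop2 s).2].filterMap (fun o => o.map (fun p => p.1)) := by
  rw [show ((2 : Int) = ((2 : Nat) : Int)) from rfl, PySem.List.slice_to_natCast]
  match s with
  | [] => rfl
  | [a] => rfl
  | a :: b :: rest => simp [pvTop2]

-- ===== VERDICT (by name: the statement is the Claim_ definition above) =====
theorem suggest_queries_spec : Claim_equal_suggest_queries := by
  intro uq pq _
  show _ = _
  unfold suggest_queries suggest_queries_alt
  rw [pvFinal]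
  have e1 : PySem.List.sorted
      (pq.foldl (fun acc query => acc ++ [(query, query_similarity uq query)]) ([] : List (String × Int)))
      (fun x => x.2) true
      = pq.foldl (fun acc q => PySem.List.insertBy pvBf (q, query_similarity uq q) acc) [] := by
    simp only [PySem.List.foldl_append_singleton_eq_map, PySem.List.sorted, List.nil_append,
      List.foldl_map]
    rfl
  rw [e1, pvTop2_foldl uq pq []]
  rfl
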